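-- pv_equiv track=rewrite | github.com/sodea9/DNA-Matchmaker | dna.py | longest_str_repeat_count
-- ===== SOURCE A (Python) =====
-- def longest_str_repeat_count(str_frag, dna_seq):
--    """
--    Input: 4 letter DNA fragment, whole DNA sequence
--    Process: counts the longest repeated sequence of the
--    given fragment in the DNA strand
--    Returns: maximum number of times repeated in a row
--    """
--    i = 0
--    timesRepeated = 0
--    maxRepeat = 0
--    while i <= len(dna_seq)-4:
--       if dna_seq[i:i+4] == str_frag:
--         timesRepeated += 1
--         i += 4
--       else:
--          if timesRepeated > maxRepeat:
--             maxRepeat = timesRepeated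
--          timesRepeated = 0
--          i += 1
--    if timesRepeated > maxRepeat:
--       return timesRepeated
--    return maxRepeat
-- ===== SOURCE B (Python) =====
-- def longest_str_repeat_count(str_frag, dna_seq):
--     """
--     Two-phase rewrite: first collect every index where the 4-char window equals
--     the fragment, then fold the greedy chain bookkeeping over just those match
--     positions (skip positions jumped over, extend a chain meeting its expected
--     position, otherwise close the chain and start a new one).
--     """
--     matches = [i for i in range(max(len(dna_seq) - 3, 0))
--                if dna_seq[i:i+4] == str_frag]
--     ptr, times, max_repeat = 0, 0, 0
--     for q in matches:
--         if q < ptr: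
--             continue
--         if times > 0 and q == ptr:
--             times += 1
--         else:
--             if times > max_repeat:
--                 max_repeat = times
--             times = 1
--         ptr = q + 4
--     return times if times > max_repeat else max_repeat
-- ===== Notes on version B (the rewrite author's own statement) =====
-- stated objective: alternative
-- what changed: A's single adaptive-step while loop (advance 4 on a match, 1 otherwise, mutating counters inline) is split into two phases: first collect the list of all indices whose 4-char window equals the fragment, then fold the greedy chain bookkeeping (skip / extend / restart) over only those match positions.
import Mathlib
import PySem

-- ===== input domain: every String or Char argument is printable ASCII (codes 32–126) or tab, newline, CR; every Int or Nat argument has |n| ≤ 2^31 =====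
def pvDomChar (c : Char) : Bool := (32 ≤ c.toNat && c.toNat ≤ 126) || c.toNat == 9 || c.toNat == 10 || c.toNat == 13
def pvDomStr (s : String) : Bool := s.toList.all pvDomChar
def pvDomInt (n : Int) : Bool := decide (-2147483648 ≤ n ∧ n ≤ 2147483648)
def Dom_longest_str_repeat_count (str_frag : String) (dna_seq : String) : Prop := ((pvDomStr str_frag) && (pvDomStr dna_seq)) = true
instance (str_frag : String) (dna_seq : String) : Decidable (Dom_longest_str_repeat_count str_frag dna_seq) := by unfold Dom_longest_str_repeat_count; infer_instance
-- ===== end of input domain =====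

-- B restructures A's adaptive-step greedy scan into two phases (collect the match
-- positions, then fold the chain bookkeeping over only those positions); same
-- return value on every input (objective: alternative decomposition).

-- shared primitive: the Python expression `dna_seq[i:i+4] == str_frag` that both sources contain
def pvIsMatch (s f : List Char) (i : Nat) : Bool :=
  PySem.List.slice s (some (i : Int)) (some ((i : Int) + 4)) == f

-- ===== PORT A =====
-- A's while loop: i advances by 4 on a match, by 1 otherwise
def pvLoopA (s f : List Char) (i t m : Nat) : Int :=
  if _h : i + 4 ≤ s.length then
    if pvIsMatch s f i then pvLoopA s f (i + 4) (t + 1) m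
    else pvLoopA s f (i + 1) 0 (if t > m then t else m)
  else if t > m then (t : Int) else (m : Int)
termination_by s.length - i
decreasing_by all_goals omega

def longest_str_repeat_count (str_frag : String) (dna_seq : String) : Int :=
  pvLoopA dna_seq.toList str_frag.toList 0 0 0

-- ===== PORT B =====
-- B's fold step over one match position q; state (ptr, times, max_repeat)
def pvStepB (st : Nat × Nat × Nat) (q : Nat) : Nat × Nat × Nat :=
  if q < st.1 then st
  else if st.2.1 > 0 && q == st.1 then (st.1 + 4, st.2.1 + 1, st.2.2)
  else (q + 4, 1, if st.2.1 > st.2.2 then st.2.1 else st.2.2)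

def pvFinB (st : Nat × Nat × Nat) : Int :=
  if st.2.1 > st.2.2 then (st.2.1 : Int) else (st.2.2 : Int)

def longest_str_repeat_count_alt (str_frag : String) (dna_seq : String) : Int :=
  let s := dna_seq.toList
  let ms := (List.range (s.length - 3)).filter (pvIsMatch s str_frag.toList)
  pvFinB (ms.foldl pvStepB (0, 0, 0))

-- ===== PRECONDITION & SPEC =====
def Spec_longest_str_repeat_count (str_frag : String) (dna_seq : String) (out : Int) : Prop := out = longest_str_repeat_count_alt str_frag dna_seq
instance (str_frag : String) (dna_seq : String) (out : Int) : Decidable (Spec_longest_str_repeat_count str_frag dna_seq out) := by unfold Spec_longest_str_repeat_count; infer_instance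

-- ===== CLAIM (what is proved, stated in full; the proofs are below) =====
def Claim_equal_longest_str_repeat_count : Prop := ∀ (str_frag : String) (dna_seq : String), Dom_longest_str_repeat_count str_frag dna_seq → Spec_longest_str_repeat_count str_frag dna_seq (longest_str_repeat_count str_frag dna_seq)

-- ===== LEMMAS AND PROOFS =====

-- the sublist of positions ≥ j in range k that satisfy P
def pvF (P : Nat → Bool) (j k : Nat) : List Nat :=
  (List.range k).filter (fun q => decide (j ≤ q) && P q)

def pvMsFrom (s f : List Char) (j : Nat) : List Nat :=
  pvF (pvIsMatch s f) j (s.length - 3)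

-- B's whole pipeline started from an arbitrary state
def pvGB (l : List Nat) (st : Nat × Nat × Nat) : Int :=
  pvFinB (l.foldl pvStepB st)

theorem pvF_nil (P : Nat → Bool) {j k : Nat} (h : k ≤ j) : pvF P j k = [] := by
  unfold pvF
  rw [List.filter_eq_nil_iff]
  intro q hq
  simp only [List.mem_range] at hq
  simp only [Bool.and_eq_true, decide_eq_true_eq, not_and]
  intro hjq
  omega

theorem pvF_mem_ge (P : Nat → Bool) {j k q : Nat} (h : q ∈ pvF P j k) : j ≤ q := by
  unfold pvF at h
  simp only [List.mem_filter, Bool.and_eq_true, decide_eq_true_eq] at h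
  exact h.2.1

theorem pvF_succ (P : Nat → Bool) (j k : Nat) :
    pvF P j (k + 1) = pvF P j k ++ (if decide (j ≤ k) && P k = true then [k] else []) := by
  unfold pvF
  rw [List.range_succ, List.filter_append]
  cases hb : (decide (j ≤ k) && P k) <;> simp [List.filter, hb]

theorem pvF_cons (P : Nat → Bool) :
    ∀ {k j : Nat}, j < k → P j = true → pvF P j k = j :: pvF P (j + 1) k := by
  intro k
  induction k with
  | zero => intro j h _; omega
  | succ k ih =>
    intro j hj hm
    rw [pvF_succ, pvF_succ]
    by_cases hjk : j < k
    · rw [ih hjk hm]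
      have h1 : decide (j ≤ k) = true := decide_eq_true (by omega)
      have h2 : decide (j + 1 ≤ k) = true := decide_eq_true (by omega)
      rw [h1, h2, List.cons_append]
    · have hjk' : j = k := by omega
      subst hjk'
      have h1 : decide (j ≤ j) = true := decide_eq_true (le_refl j)
      have h2 : decide (j + 1 ≤ j) = false := decide_eq_false (by omega)
      rw [h1, h2, hm, pvF_nil P (le_refl j), pvF_nil P (by omega : j ≤ j + 1)]
      simp

theorem pvF_skip (P : Nat → Bool) {j k : Nat} (h : ¬ (j < k ∧ P j = true)) :
    pvF P j k = pvF P (j + 1) k := by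
  unfold pvF
  apply List.filter_congr
  intro q hq
  simp only [List.mem_range] at hq
  by_cases hqj : q = j
  · subst hqj
    have hp : P q = false := by
      rcases Bool.eq_false_or_eq_true (P q) with h' | h'
      · exact absurd ⟨hq, h'⟩ h
      · exact h'
    simp [hp]
  · have h1 : decide (j ≤ q) = decide (j + 1 ≤ q) := by
      rw [decide_eq_decide]; omega
    rw [h1]

-- positions strictly below the pointer are no-ops for B's fold
theorem pvGB_skips (s f : List Char) (p t m : Nat) :
    ∀ d j, j + d = p → pvGB (pvMsFrom s f j) (p, t, m) = pvGB (pvMsFrom s f p) (p, t, m) := by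
  intro d
  induction d with
  | zero => intro j h; rw [show j = p by omega]
  | succ d ih =>
    intro j h
    have hstep : pvGB (pvMsFrom s f j) (p, t, m) = pvGB (pvMsFrom s f (j + 1)) (p, t, m) := by
      by_cases hc : j < s.length - 3 ∧ pvIsMatch s f j = true
      · unfold pvMsFrom
        rw [pvF_cons (pvIsMatch s f) hc.1 hc.2]
        unfold pvGB
        rw [List.foldl_cons]
        have hsk : pvStepB (p, t, m) j = (p, t, m) := by
          have hlt : j < p := by omega
          simp [pvStepB, hlt]
        rw [hsk]
      · unfold pvMsFrom
        rw [pvF_skip (pvIsMatch s f) hc]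
    rw [hstep, ih (j + 1) (by omega)]

-- resetting the counter at a mismatch commutes with B's fold
theorem pvGB_reset (i t m : Nat) (l : List Nat) (hl : ∀ q ∈ l, i + 1 ≤ q) :
    pvGB l (i, t, m) = pvGB l (i + 1, 0, if t > m then t else m) := by
  cases l with
  | nil =>
    simp only [pvGB, List.foldl_nil, pvFinB]
    split_ifs <;> omega
  | cons q rest =>
    have hq : i + 1 ≤ q := hl q (by simp)
    have hbe : (q == i) = false := by
      simp only [beq_eq_false_iff_ne, ne_eq]
      omega
    have h1 : pvStepB (i, t, m) q = (q + 4, 1, if t > m then t else m) := by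
      have hlt : ¬ q < i := by omega
      simp [pvStepB, hlt, hbe]
    have h2 : pvStepB (i + 1, 0, if t > m then t else m) q
        = (q + 4, 1, if t > m then t else m) := by
      have hlt : ¬ q < i + 1 := by omega
      simp [pvStepB, hlt]
    unfold pvGB
    rw [List.foldl_cons, List.foldl_cons, h1, h2]

-- the one-step state update at a match position agrees with A's counter bump
theorem pvStepB_match (i t m : Nat) : pvStepB (i, t, m) i = (i + 4, t + 1, m) := by
  cases t with
  | zero => simp [pvStepB]
  | succ t' => simp [pvStepB]

-- main loop invariant: A's scan from i equals B's fold over the matches ≥ i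
theorem pvMain (s f : List Char) :
    ∀ N i t m, s.length - i ≤ N → pvLoopA s f i t m = pvGB (pvMsFrom s f i) (i, t, m) := by
  intro N
  induction N with
  | zero =>
    intro i t m hN
    have h : ¬ (i + 4 ≤ s.length) := by omega
    rw [pvLoopA, dif_neg h]
    unfold pvMsFrom
    rw [pvF_nil (pvIsMatch s f) (by omega : s.length - 3 ≤ i)]
    simp only [pvGB, List.foldl_nil, pvFinB]
  | succ N ih =>
    intro i t m hN
    rw [pvLoopA]
    by_cases h : i + 4 ≤ s.length
    · rw [dif_pos h]
      by_cases hm : pvIsMatch s f i = true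
      · rw [if_pos hm, ih (i + 4) (t + 1) m (by omega)]
        have hk : i < s.length - 3 := by omega
        unfold pvMsFrom
        rw [pvF_cons (pvIsMatch s f) hk hm]
        have : pvGB (i :: pvF (pvIsMatch s f) (i + 1) (s.length - 3)) (i, t, m)
            = pvGB (pvF (pvIsMatch s f) (i + 1) (s.length - 3)) (i + 4, t + 1, m) := by
          unfold pvGB
          rw [List.foldl_cons, pvStepB_match]
        rw [this]
        exact (pvGB_skips s f (i + 4) (t + 1) m 3 (i + 1) (by omega)).symm
      · rw [if_neg hm, ih (i + 1) 0 (if t > m then t else m) (by omega)]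
        have hskip : pvMsFrom s f i = pvMsFrom s f (i + 1) := by
          unfold pvMsFrom
          exact pvF_skip (pvIsMatch s f) (by intro hc; exact hm hc.2)
        rw [hskip]
        exact (pvGB_reset i t m (pvMsFrom s f (i + 1))
          (fun q hq => pvF_mem_ge (pvIsMatch s f) hq)).symm
    · rw [dif_neg h]
      unfold pvMsFrom
      rw [pvF_nil (pvIsMatch s f) (by omega : s.length - 3 ≤ i)]
      simp only [pvGB, List.foldl_nil, pvFinB]

theorem pvMsFrom_zero (s f : List Char) :
    pvMsFrom s f 0 = (List.range (s.length - 3)).filter (pvIsMatch s f) := by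
  unfold pvMsFrom pvF
  apply List.filter_congr
  intro q _
  simp

-- ===== VERDICT (by name: the statement is the Claim_ definition above) =====
theorem longest_str_repeat_count_spec : Claim_equal_longest_str_repeat_count := by
  intro str_frag dna_seq _
  unfold Spec_longest_str_repeat_count longest_str_repeat_count longest_str_repeat_count_alt
  rw [pvMain dna_seq.toList str_frag.toList dna_seq.toList.length 0 0 0 (by omega),
    pvMsFrom_zero]
  rfl
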